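-- pv_equiv track=rewrite | github.com/osom8979/tbag | script/pytools/properties.py | get_namespace_list_using
-- ===== SOURCE A (Python) =====
-- def get_namespace_list_using(classpath, strip=0):
--     names = classpath.split('/')[strip:-1]
--     if len(names) == 0:
--         return ''
--     result = ''
--     append = ''
--     for name in names:
--         append += name
--         result += "using namespace {};\n".format(append)
--         append += '::'
--     return result.strip()
-- ===== SOURCE B (Python) =====
-- def get_namespace_list_using(classpath, strip=0):
--     names = classpath.split('/')[strip:-1]
--     return '\n'.join('using namespace {};'.format('::'.join(names[:i + 1]))
--                      for i in range(len(names)))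
-- ===== Notes on version B (the rewrite author's own statement) =====
-- stated objective: simpler
-- what changed: Replaces the growing string accumulator, the empty-list guard and the final strip() call with a single newline-join over lines whose cumulative prefixes are recomputed independently by joining a slice of the names.
import Mathlib
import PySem

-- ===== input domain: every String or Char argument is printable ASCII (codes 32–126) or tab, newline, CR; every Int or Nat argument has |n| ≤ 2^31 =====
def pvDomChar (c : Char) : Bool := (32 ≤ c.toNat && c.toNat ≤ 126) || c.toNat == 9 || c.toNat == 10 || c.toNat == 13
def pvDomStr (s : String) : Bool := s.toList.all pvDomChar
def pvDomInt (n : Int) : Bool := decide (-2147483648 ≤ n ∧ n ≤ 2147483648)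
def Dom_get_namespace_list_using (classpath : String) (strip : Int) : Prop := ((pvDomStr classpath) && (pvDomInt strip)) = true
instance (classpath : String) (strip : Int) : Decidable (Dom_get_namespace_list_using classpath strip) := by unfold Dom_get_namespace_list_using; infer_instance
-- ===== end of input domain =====

-- ===== PORT A =====
-- B changes A's growing-accumulator loop + final .strip() into '\n'.join over recomputed prefixes (objective: simpler).
def get_namespace_list_using (classpath : String) (strip : Int) : String :=
  let names := PySem.List.slice (PySem.Chars.splitOn classpath.toList ['/']) (some strip) (some (-1))
  if names.length = 0 then ""
  else
    let st := names.foldl (fun st name =>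
      let app := st.2 ++ name
      (st.1 ++ ("using namespace ".toList ++ app ++ [';', '\n']), app ++ [':', ':']))
      (([] : List Char), ([] : List Char))
    String.ofList (PySem.Chars.strip st.1)

-- ===== PORT B =====
def get_namespace_list_using_alt (classpath : String) (strip : Int) : String :=
  let names := PySem.List.slice (PySem.Chars.splitOn classpath.toList ['/']) (some strip) (some (-1))
  String.ofList (PySem.Chars.join ['\n']
    ((PySem.List.pyRange 0 names.length 1).map (fun i =>
      "using namespace ".toList
        ++ PySem.Chars.join [':', ':'] (PySem.List.slice names none (some (i + 1)))
        ++ [';'])))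

-- ===== PRECONDITION & SPEC =====
def Spec_get_namespace_list_using (classpath : String) (strip : Int) (out : String) : Prop := out = get_namespace_list_using_alt classpath strip
instance (classpath : String) (strip : Int) (out : String) : Decidable (Spec_get_namespace_list_using classpath strip out) := by unfold Spec_get_namespace_list_using; infer_instance

-- ===== CLAIM (what is proved, stated in full; the proofs are below) =====
def Claim_equal_get_namespace_list_using : Prop := ∀ (classpath : String) (strip : Int), Dom_get_namespace_list_using classpath strip → Spec_get_namespace_list_using classpath strip (get_namespace_list_using classpath strip)

-- ===== LEMMAS AND PROOFS =====

lemma join_cons_of_ne (sep x : List Char) (l : List (List Char)) (h : l ≠ []) :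
    PySem.Chars.join sep (x :: l) = x ++ sep ++ PySem.Chars.join sep l := by
  cases l with
  | nil => exact absurd rfl h
  | cons y t => exact PySem.Chars.join_cons_cons sep x y t

lemma flatten_newline (l : List (List Char)) (h : l ≠ []) :
    (l.map (· ++ ['\n'])).flatten = PySem.Chars.join ['\n'] l ++ ['\n'] := by
  induction l with
  | nil => exact absurd rfl h
  | cons x t ih =>
    cases t with
    | nil => simp [PySem.Chars.join_singleton]
    | cons y s =>
      have hstep : (List.map (· ++ ['\n']) (x :: y :: s)).flatten
          = (x ++ ['\n']) ++ (List.map (· ++ ['\n']) (y :: s)).flatten := by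
        simp
      rw [hstep, ih (by simp), join_cons_of_ne ['\n'] x (y :: s) (by simp)]
      simp [List.append_assoc]

lemma head_join (l : List (List Char)) (h : l ≠ []) (hh : ∀ x ∈ l, x.head? = some 'u') :
    (PySem.Chars.join ['\n'] l).head? = some 'u' := by
  cases l with
  | nil => exact absurd rfl h
  | cons x t =>
    have hx := hh x (by simp)
    obtain ⟨x', rfl⟩ : ∃ x', x = 'u' :: x' := by
      cases x with
      | nil => simp at hx
      | cons c cs => simp at hx; exact ⟨cs, by simp [hx]⟩
    cases t with
    | nil => simp [PySem.Chars.join_singleton]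
    | cons y s => rw [PySem.Chars.join_cons_cons]; simp

lemma last_join (l : List (List Char)) (h : l ≠ []) (hh : ∀ x ∈ l, x.getLast? = some ';') :
    (PySem.Chars.join ['\n'] l).getLast? = some ';' := by
  induction l with
  | nil => exact absurd rfl h
  | cons x t ih =>
    cases t with
    | nil => simpa [PySem.Chars.join_singleton] using hh x (by simp)
    | cons y s =>
      rw [PySem.Chars.join_cons_cons]
      have htail : (PySem.Chars.join ['\n'] (y :: s)).getLast? = some ';' :=
        ih (by simp) (fun z hz => hh z (by simp [hz]))
      have hne : PySem.Chars.join ['\n'] (y :: s) ≠ [] := by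
        intro hnil; rw [hnil] at htail; simp at htail
      rw [List.getLast?_append_of_ne_nil _ hne, htail]

lemma strip_nl (X : List Char) (h1 : X.head? = some 'u') (h2 : X.getLast? = some ';') :
    PySem.Chars.strip (X ++ ['\n']) = X := by
  obtain ⟨X', rfl⟩ : ∃ X', X = 'u' :: X' := by
    cases X with
    | nil => simp at h1
    | cons c cs => simp at h1; exact ⟨cs, by simp [h1]⟩
  obtain ⟨Y, hY⟩ : ∃ Y, ('u' :: X').reverse = ';' :: Y := by
    have hh : ('u' :: X').reverse.head? = some ';' := by
      rw [List.head?_reverse]; exact h2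
    cases hrev : ('u' :: X').reverse with
    | nil => rw [hrev] at hh; simp at hh
    | cons c cs => rw [hrev] at hh; simp at hh; exact ⟨cs, by simp [hh]⟩
  have hl : PySem.Chars.lstrip (('u' :: X') ++ ['\n']) = ('u' :: X') ++ ['\n'] := by
    simp only [PySem.Chars.lstrip, List.cons_append]
    rw [List.dropWhile_cons_of_neg (by decide)]
  have hrev2 : (('u' :: X') ++ ['\n']).reverse = '\n' :: ';' :: Y := by
    rw [List.reverse_append, hY]; rfl
  have hr : PySem.Chars.rstrip (('u' :: X') ++ ['\n']) = 'u' :: X' := by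
    simp only [PySem.Chars.rstrip, hrev2]
    rw [List.dropWhile_cons_of_pos (by decide), List.dropWhile_cons_of_neg (by decide),
      ← hY, List.reverse_reverse]
  simp only [PySem.Chars.strip]
  rw [hl, hr]

lemma foldA_eq (names : List (List Char)) (r a : List Char) :
    (names.foldl (fun st name =>
      let app := st.2 ++ name
      (st.1 ++ ("using namespace ".toList ++ app ++ [';', '\n']), app ++ [':', ':']))
      (r, a)).1
    = r ++ ((List.range names.length).map (fun i =>
        "using namespace ".toList ++ a ++ PySem.Chars.join [':', ':'] (names.take (i+1))
          ++ [';', '\n'])).flatten := by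
  induction names generalizing r a with
  | nil => simp
  | cons n t ih =>
    simp only [List.foldl_cons, List.length_cons, List.range_succ_eq_map, List.map_cons,
      List.map_map, List.flatten_cons]
    rw [ih]
    have hmap : ∀ i ∈ List.range t.length,
        ("using namespace ".toList ++ (a ++ n ++ [':', ':'])
          ++ PySem.Chars.join [':', ':'] (t.take (i+1)) ++ [';', '\n'])
        = ((fun i => "using namespace ".toList ++ a
            ++ PySem.Chars.join [':', ':'] ((n :: t).take (i+1)) ++ [';', '\n']) ∘ Nat.succ) i := by
      intro i hi
      have hne : t.take (i+1) ≠ [] := by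
        simp at hi
        intro hnil
        have := List.take_eq_nil_iff.mp hnil
        rcases this with h | h
        · omega
        · simp [h] at hi
      simp only [Function.comp, List.take_succ_cons]
      rw [join_cons_of_ne _ _ _ hne]
      simp [List.append_assoc]
    rw [List.map_congr_left hmap]
    simp [PySem.Chars.join_singleton, List.append_assoc]

lemma lineB_newline (names : List (List Char)) :
    (fun i => "using namespace ".toList ++ ([] : List Char)
        ++ PySem.Chars.join [':', ':'] (names.take (i+1)) ++ [';', '\n'])
    = (fun i => ("using namespace ".toList
        ++ PySem.Chars.join [':', ':'] (names.take (i+1)) ++ [';']) ++ ['\n']) := by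
  funext i
  simp [List.append_assoc]

lemma core_eq (names : List (List Char)) :
    (if names.length = 0 then ""
     else
       let st := names.foldl (fun st name =>
         let app := st.2 ++ name
         (st.1 ++ ("using namespace ".toList ++ app ++ [';', '\n']), app ++ [':', ':']))
         (([] : List Char), ([] : List Char))
       String.ofList (PySem.Chars.strip st.1))
    = String.ofList (PySem.Chars.join ['\n']
        ((PySem.List.pyRange 0 names.length 1).map (fun i =>
          "using namespace ".toList
            ++ PySem.Chars.join [':', ':'] (PySem.List.slice names none (some (i + 1)))
            ++ [';']))) := by
  have hB : (PySem.List.pyRange 0 names.length 1).map (fun i =>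
        "using namespace ".toList
          ++ PySem.Chars.join [':', ':'] (PySem.List.slice names none (some (i + 1)))
          ++ [';'])
      = (List.range names.length).map (fun k =>
        "using namespace ".toList
          ++ PySem.Chars.join [':', ':'] (names.take (k+1)) ++ [';']) := by
    rw [PySem.List.pyRange_zero_natCast, List.map_map]
    apply List.map_congr_left
    intro k _
    have : ((k : Int) + 1) = ((k + 1 : Nat) : Int) := by push_cast; ring
    simp only [Function.comp, this, PySem.List.slice_to_natCast]
  rw [hB]
  by_cases h : names.length = 0
  · rw [if_pos h, h]
    simp [PySem.Chars.join_nil]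
  · rw [if_neg h]
    show String.ofList (PySem.Chars.strip (names.foldl _ (([] : List Char), ([] : List Char))).1) = _
    rw [foldA_eq names [] []]
    rw [List.nil_append, lineB_newline names]
    have hconv : List.map (fun i => ("using namespace ".toList
          ++ PySem.Chars.join [':', ':'] (names.take (i+1)) ++ [';']) ++ ['\n'])
          (List.range names.length)
        = List.map (· ++ ['\n']) (List.map (fun k => "using namespace ".toList
          ++ PySem.Chars.join [':', ':'] (names.take (k+1)) ++ [';']) (List.range names.length)) := by
      rw [List.map_map]
      apply List.map_congr_left
      intro k _
      rfl
    rw [hconv]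
    have hne : (List.range names.length).map (fun k =>
        "using namespace ".toList ++ PySem.Chars.join [':', ':'] (names.take (k+1)) ++ [';']) ≠ [] := by
      simp only [ne_eq, List.map_eq_nil_iff, List.range_eq_nil]
      exact h
    rw [flatten_newline _ hne]
    rw [strip_nl]
    · apply head_join _ hne
      intro x hx
      simp only [List.mem_map] at hx
      obtain ⟨k, _, rfl⟩ := hx
      rfl
    · apply last_join _ hne
      intro x hx
      simp only [List.mem_map] at hx
      obtain ⟨k, _, rfl⟩ := hx
      rw [List.getLast?_append_of_ne_nil _ (by simp)]
      rfl

-- ===== VERDICT (by name: the statement is the Claim_ definition above) =====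
theorem get_namespace_list_using_spec : Claim_equal_get_namespace_list_using := by
  intro classpath strip _
  unfold Spec_get_namespace_list_using
  show get_namespace_list_using classpath strip = get_namespace_list_using_alt classpath strip
  unfold get_namespace_list_using get_namespace_list_using_alt
  exact core_eq _
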